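-- pv_equiv track=rewrite | github.com/markopisacic/TAR-project | data/data_parsing.py | split_with_offsets
-- ===== SOURCE A (Python) =====
-- def split_with_offsets(line):
--     words = line.split()
--     offsets = []
--     running_offset = 0
--     for word in words:
--         word_offset = line.index(word, running_offset)
--         word_len = len(word)
--         running_offset = word_offset + word_len
--         offsets.append((word, word_offset, running_offset - 1))
--     return offsets
-- ===== SOURCE B (Python) =====
-- def split_with_offsets(line):
--     offsets = []
--     i = 0
--     n = len(line)
--     while i < n:
--         if line[i].isspace():
--             i += 1
--         else:
--             j = i
--             while j < n and not line[j].isspace():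
--                 j += 1
--             offsets.append((line[i:j], i, j - 1))
--             i = j
--     return offsets
-- ===== Notes on version B (the rewrite author's own statement) =====
-- stated objective: alternative
-- what changed: Replaces split() plus a repeated substring search (line.index) per word with a single left-to-right index scan that detects word runs via isspace and slices them out directly, never re-searching the string.
import Mathlib
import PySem

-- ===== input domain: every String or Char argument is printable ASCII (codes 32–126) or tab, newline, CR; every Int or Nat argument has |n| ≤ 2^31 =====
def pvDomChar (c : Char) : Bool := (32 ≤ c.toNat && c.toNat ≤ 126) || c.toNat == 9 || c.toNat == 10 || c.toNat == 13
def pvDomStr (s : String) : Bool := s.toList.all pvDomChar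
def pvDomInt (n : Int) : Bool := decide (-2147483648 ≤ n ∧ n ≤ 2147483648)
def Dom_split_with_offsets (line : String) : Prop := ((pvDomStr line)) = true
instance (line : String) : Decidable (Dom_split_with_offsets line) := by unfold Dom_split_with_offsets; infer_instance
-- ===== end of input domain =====

-- B replaces A's split() + per-word substring search (line.index) with a single
-- left-to-right index scan over the characters; same return value, no mutation.

-- ===== PORT A =====
-- line.index(word, running_offset) is ported as PySem.Str.findFrom (Python's str.find);
-- on these calls the word is always found, so the ValueError branch of index is unreachable.
def split_with_offsets (line : String) : List (String × Int × Int) :=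
  ((PySem.Str.split₀ line).foldl
    (fun (st : List (String × Int × Int) × Int) word =>
      let word_offset := PySem.Str.findFrom line word st.2
      let word_len := PySem.Str.len word
      let running_offset := word_offset + word_len
      (st.1 ++ [(word, word_offset, running_offset - 1)], running_offset))
    ([], 0)).1

-- ===== PORT B =====
-- B's while-loop over index i: skip a space, or take the whole non-space run
-- (the inner `while j < n and not line[j].isspace()` = takeWhile/dropWhile) and emit it.
def pvScanB (cs : List Char) (i : Nat) : List (String × Int × Int) :=
  match cs with
  | [] => []
  | c :: rest =>
    if PySem.Chars.isspace c then pvScanB rest (i + 1)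
    else
      let w := (c :: rest).takeWhile (fun d => !PySem.Chars.isspace d)
      (String.ofList w, (i : Int), (i : Int) + w.length - 1)
        :: pvScanB ((c :: rest).dropWhile (fun d => !PySem.Chars.isspace d)) (i + w.length)
termination_by cs.length
decreasing_by
  · simp
  · simp only [List.dropWhile_cons]
    simp_all
    exact List.length_dropWhile_le _ rest

def split_with_offsets_alt (line : String) : List (String × Int × Int) :=
  pvScanB line.toList 0

-- ===== PRECONDITION & SPEC =====
def Spec_split_with_offsets (line : String) (out : List (String × Int × Int)) : Prop := out = split_with_offsets_alt line
instance (line : String) (out : List (String × Int × Int)) : Decidable (Spec_split_with_offsets line out) := by unfold Spec_split_with_offsets; infer_instance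

-- ===== CLAIM (what is proved, stated in full; the proofs are below) =====
def Claim_equal_split_with_offsets : Prop := ∀ (line : String), Dom_split_with_offsets line → Spec_split_with_offsets line (split_with_offsets line)

-- ===== LEMMAS AND PROOFS =====

-- canonical whitespace tokenizer (proof helper)
def pvToks (cs : List Char) : List (List Char) :=
  match cs with
  | [] => []
  | c :: rest =>
    if PySem.Chars.isspace c then pvToks rest
    else (c :: rest).takeWhile (fun d => !PySem.Chars.isspace d)
      :: pvToks ((c :: rest).dropWhile (fun d => !PySem.Chars.isspace d))
termination_by cs.length
decreasing_by
  · simp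
  · simp only [List.dropWhile_cons]
    simp_all
    exact List.length_dropWhile_le _ rest

-- recursive form of A's loop (proof helper)
def pvEmitA (line : String) : List String → Int → List (String × Int × Int)
  | [], _ => []
  | w :: ws, r =>
    let off := PySem.Str.findFrom line w r
    (w, off, off + PySem.Str.len w - 1) :: pvEmitA line ws (off + PySem.Str.len w)

theorem pvToks_cons_space {c : Char} (rest : List Char) (hc : PySem.Chars.isspace c = true) :
    pvToks (c :: rest) = pvToks rest := by
  rw [pvToks]; simp [hc]

theorem pvToks_cons_nonspace {c : Char} (rest : List Char) (hc : PySem.Chars.isspace c = false) :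
    pvToks (c :: rest) =
      (c :: rest).takeWhile (fun d => !PySem.Chars.isspace d)
        :: pvToks ((c :: rest).dropWhile (fun d => !PySem.Chars.isspace d)) := by
  rw [pvToks]; simp [hc]

theorem pv_go_spec (s : List Char) : ∀ (cur : List Char) (acc : List (List Char)),
    PySem.Chars.split₀.go s cur acc =
      acc.reverse ++ (if cur.isEmpty then pvToks s
        else (cur.reverse ++ s.takeWhile (fun d => !PySem.Chars.isspace d))
          :: pvToks (s.dropWhile (fun d => !PySem.Chars.isspace d))) := by
  induction s with
  | nil =>
    intro cur acc
    cases cur <;> simp [PySem.Chars.split₀.go, pvToks]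
  | cons c rest ih =>
    intro cur acc
    rw [PySem.Chars.split₀.go]
    by_cases hc : PySem.Chars.isspace c
    · by_cases hcur : cur = []
      · subst hcur
        simp only [hc, if_true, List.isEmpty_nil, ih]
        rw [pvToks]
        simp [hc]
      · simp only [hc, if_true, List.isEmpty_iff, hcur, ih]
        simp [hc, pvToks_cons_space rest hc]
    · simp only [hc, Bool.false_eq_true, if_false, ih]
      by_cases hcur : cur = []
      · subst hcur
        rw [pvToks]
        simp [hc]
      · simp [hc, hcur]

theorem pv_split₀_eq_toks (s : List Char) : PySem.Chars.split₀ s = pvToks s := by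
  simpa using pv_go_spec s [] []

theorem pv_foldA_eq (line : String) (ws : List String) :
    ∀ (acc : List (String × Int × Int)) (r : Int),
    (ws.foldl
      (fun (st : List (String × Int × Int) × Int) word =>
        let word_offset := PySem.Str.findFrom line word st.2
        let word_len := PySem.Str.len word
        let running_offset := word_offset + word_len
        (st.1 ++ [(word, word_offset, running_offset - 1)], running_offset))
      (acc, r)).1 = acc ++ pvEmitA line ws r := by
  induction ws with
  | nil => intro acc r; simp [pvEmitA]
  | cons w ws ih =>
    intro acc r
    simp only [List.foldl_cons, ih, pvEmitA, List.append_assoc, List.singleton_append]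

theorem pv_find_mid (mid w rest : List Char) (c : Char) (w' : List Char)
    (hw : w = c :: w') (hc : PySem.Chars.isspace c = false)
    (hmid : ∀ x ∈ mid, PySem.Chars.isspace x = true) :
    PySem.Chars.find (mid ++ (w ++ rest)) w = (mid.length : Int) := by
  have hdropmid : List.drop mid.length (mid ++ (w ++ rest)) = w ++ rest := List.drop_left
  have hpre : w <+: List.drop mid.length (mid ++ (w ++ rest)) := by
    rw [hdropmid]; exact List.prefix_append w rest
  have hnn : 0 ≤ PySem.Chars.find (mid ++ (w ++ rest)) w :=
    (PySem.Chars.find_nonneg_iff _ _).mpr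
      (hpre.isInfix.trans (List.drop_suffix _ _).isInfix)
  obtain ⟨hat, hmin⟩ := PySem.Chars.find_spec hnn
  have hle : (PySem.Chars.find (mid ++ (w ++ rest)) w).toNat ≤ mid.length := by
    by_contra h
    exact hmin mid.length (by omega) hpre
  have hge : mid.length ≤ (PySem.Chars.find (mid ++ (w ++ rest)) w).toNat := by
    by_contra h
    rw [List.drop_append_of_le_length (by omega)] at hat
    cases hmd : mid.drop (PySem.Chars.find (mid ++ (w ++ rest)) w).toNat with
    | nil =>
      have := congrArg List.length hmd
      simp at this
      omega
    | cons m d' =>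
      rw [hmd] at hat
      obtain ⟨t, ht⟩ := hat
      rw [hw] at ht
      simp only [List.cons_append, List.cons.injEq] at ht
      have hm : m ∈ mid := (List.drop_sublist _ mid).subset (hmd ▸ List.mem_cons_self)
      have := hmid m hm
      rw [← ht.1, hc] at this
      exact Bool.false_ne_true this
  rw [← Int.toNat_of_nonneg hnn]
  exact_mod_cast le_antisymm hle hge

theorem pv_main (line : String) :
    ∀ (n : Nat) (suf : List Char) (i r : Nat), suf.length = n →
      List.drop i line.toList = suf → i ≤ line.toList.length → r ≤ i →
      (∀ j (h : j < line.toList.length), r ≤ j → j < i →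
        PySem.Chars.isspace line.toList[j] = true) →
      pvEmitA line ((pvToks suf).map String.ofList) (r : Int) = pvScanB suf i := by
  intro n
  induction n using Nat.strong_induction_on with
  | _ n ih =>
    intro suf i r hlen hdrop hile hri hsp
    cases suf with
    | nil => rw [pvToks, pvScanB]; simp [pvEmitA]
    | cons c rest =>
      have hilt : i < line.toList.length := by
        by_contra h
        have : List.drop i line.toList = [] := List.drop_eq_nil_of_le (by omega)
        simp [this] at hdrop
      have hgi : line.toList[i] = c := by
        have h0 : (List.drop i line.toList)[0]'(by rw [hdrop]; simp) = line.toList[i] := by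
          simp [List.getElem_drop]
        rw [← h0]
        simp only [hdrop]
        rfl
      by_cases hc : PySem.Chars.isspace c
      · rw [pvToks_cons_space rest hc, pvScanB]
        simp only [hc, if_true]
        have hdrop' : List.drop (i + 1) line.toList = rest := by
          rw [← List.drop_drop, hdrop]; rfl
        have hlenn : rest.length + 1 = n := by simpa using hlen
        refine ih rest.length (by omega) rest (i + 1) r rfl hdrop' (by omega) (by omega) ?_
        intro j h hrj hji
        rcases Nat.lt_or_ge j i with hj | hj
        · exact hsp j h hrj hj
        · have : j = i := by omega
          subst this
          rw [hgi]; exact hc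
      · rw [pvToks_cons_nonspace rest (by simpa using hc), pvScanB]
        simp only [hc, List.map_cons]
        set w := (c :: rest).takeWhile (fun d => !PySem.Chars.isspace d) with hw
        set r' := (c :: rest).dropWhile (fun d => !PySem.Chars.isspace d) with hr'
        have hsplit : w ++ r' = c :: rest := List.takeWhile_append_dropWhile
        have hwcons : w = c :: rest.takeWhile (fun d => !PySem.Chars.isspace d) := by
          rw [hw, List.takeWhile_cons]
          simp [hc]
        have hw1 : 1 ≤ w.length := by rw [hwcons]; simp
        -- the suffix of line from r splits as (spaces r..i) ++ w ++ r'
        have hmidsplit :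
            List.drop r line.toList = (List.drop r line.toList).take (i - r) ++ (w ++ r') := by
          conv_lhs => rw [← List.take_append_drop (i - r) (List.drop r line.toList)]
          rw [List.drop_drop, Nat.add_sub_cancel' hri, hdrop, hsplit]
        have hmidlen : ((List.drop r line.toList).take (i - r)).length = i - r := by
          simp only [List.length_take, List.length_drop]
          omega
        have hmid : ∀ x ∈ (List.drop r line.toList).take (i - r),
            PySem.Chars.isspace x = true := by
          intro x hx
          obtain ⟨j, hj, hxj⟩ := List.mem_iff_getElem.mp hx
          rw [List.getElem_take, List.getElem_drop] at hxj
          rw [← hxj]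
          have hj' : j < i - r := by rw [hmidlen] at hj; exact hj
          exact hsp (r + j) (by omega) (by omega) (by omega)
        -- the offset A finds is exactly i
        have hoff : PySem.Str.findFrom line (String.ofList w) (r : Int) none = (i : Int) := by
          rw [PySem.Str.findFrom_eq, String.toList_ofList]
          rw [PySem.Chars.findFrom_natCast _ _ r (by omega)]
          have hfind : PySem.Chars.find (List.drop r line.toList) w = ((i - r : Nat) : Int) := by
            rw [hmidsplit, pv_find_mid _ w r' c _ hwcons (by simpa using hc) hmid, hmidlen]
          rw [hfind]
          have : ((i - r : Nat) : Int) ≠ -1 := by omega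
          simp only [this, if_false]
          omega
        rw [pvEmitA]
        simp only [hoff, PySem.Str.len_eq, String.toList_ofList]
        have hlen' : (List.drop i line.toList).length = line.toList.length - i :=
          List.length_drop
        have hwle : w.length ≤ (c :: rest).length := by
          conv_rhs => rw [← hsplit]
          simp
        have hile' : i + w.length ≤ line.toList.length := by
          rw [hdrop] at hlen'
          omega
        have hdrop2 : List.drop (i + w.length) line.toList = r' := by
          rw [← List.drop_drop, hdrop, ← hsplit, List.drop_left]
        have hrlt : r'.length < n := by
          have hsum : w.length + r'.length = (c :: rest).length := by
            rw [← List.length_append, hsplit]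
          have hlenn : rest.length + 1 = n := by simpa using hlen
          simp at hsum
          omega
        have hrec := ih r'.length hrlt r' (i + w.length) (i + w.length) rfl hdrop2 hile'
          (le_refl _) (by omega)
        push_cast at hrec ⊢
        rw [hrec]

-- ===== VERDICT (by name: the statement is the Claim_ definition above) =====
theorem split_with_offsets_spec : Claim_equal_split_with_offsets := by
  intro line _
  show split_with_offsets line = split_with_offsets_alt line
  unfold split_with_offsets split_with_offsets_alt
  rw [show PySem.Str.split₀ line = (PySem.Chars.split₀ line.toList).map String.ofList from rfl,
      pv_split₀_eq_toks, pv_foldA_eq]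
  simpa using pv_main line line.toList.length line.toList 0 0 rfl rfl (by omega) (le_refl 0)
    (by omega)
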